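-- pv_equiv track=rewrite | github.com/jqyang3108/Python-Learning | Previous/Prelab03/simpleTasks.py | convertToInteger
-- ===== SOURCE A (Python) =====
-- def convertToInteger(bList):
--     if(type(bList) != list):
--         return
--     elif(len(bList) == 0):
--         return
--     else:
--         output = 0
--         lenB = len(bList)
--         i=lenB-1
--         j=0
--         k=0
--         while(i >= 0):
--             if(type(bList[i]) != bool):
--                 return
--             if(bList[i] == True):
--                 j=0
--                 power2=1
--                 if (k == 0):
--                     power2 = 1                        #2^0
--                 while(j < k):                        #2^j
--                     power2 = power2 * 2
--                     j+=1
--                 output = output + power2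
--             k+=1
--             i-=1
--
--     return output
-- ===== SOURCE B (Python) =====
-- def convertToInteger(bList):
--     if type(bList) != list:
--         return
--     if len(bList) == 0:
--         return
--     out = 0
--     for b in bList:
--         if type(b) != bool:
--             return
--         out = out * 2 + (1 if b else 0)
--     return out
-- ===== Notes on version B (the rewrite author's own statement) =====
-- stated objective: faster
-- what changed: Replaced the backwards index loop with an inner power-of-two loop by a single left-to-right pass with a Horner accumulator (out = 2*out + bit).
-- outside the precondition, e.g. on convertToInteger([]): A returns None, B returns None
import Mathlib
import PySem

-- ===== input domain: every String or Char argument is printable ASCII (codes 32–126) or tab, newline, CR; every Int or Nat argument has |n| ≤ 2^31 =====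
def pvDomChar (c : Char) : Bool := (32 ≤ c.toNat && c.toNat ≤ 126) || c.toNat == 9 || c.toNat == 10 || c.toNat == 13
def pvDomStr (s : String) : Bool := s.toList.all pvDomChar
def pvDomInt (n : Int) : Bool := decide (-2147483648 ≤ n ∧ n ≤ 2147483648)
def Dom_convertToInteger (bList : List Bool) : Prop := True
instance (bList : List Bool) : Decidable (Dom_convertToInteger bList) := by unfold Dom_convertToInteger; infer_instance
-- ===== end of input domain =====

-- B replaces A's quadratic backwards loop (inner power-of-two loop) by one Horner pass; faster (asymptotic).

-- ===== PORT A =====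
-- inner while: j=0; power2=1; while j < k: power2 *= 2; j += 1   (fuel = k - j = k)
def pvPowLoop : Nat → Int → Int
  | 0, power2 => power2
  | k + 1, power2 => pvPowLoop k (power2 * 2)

-- outer while: i = lenB-1 .. 0, k = 0 .. ; fuel n = i + 1
def pvLoopA (bList : List Bool) : Nat → Nat → Int → Int
  | 0, _, output => output
  | n + 1, k, output =>
      let output' := if bList.getD n false = true then output + pvPowLoop k 1 else output
      pvLoopA bList n (k + 1) output'

def convertToInteger (bList : List Bool) : Int :=
  if bList.length = 0 then 0  -- Python A returns None here; excluded by Pre_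
  else pvLoopA bList bList.length 0 0

-- ===== PORT B =====
def convertToInteger_alt (bList : List Bool) : Int :=
  if bList.length = 0 then 0  -- Source B returns None here; excluded by Pre_
  else bList.foldl (fun out b => out * 2 + (if b then 1 else 0)) 0

-- ===== PRECONDITION & SPEC =====
-- Pre_ excludes the empty list, on which A (and B) return None, not an int.
def Pre_convertToInteger (bList : List Bool) : Prop := bList ≠ []
instance (bList : List Bool) : Decidable (Pre_convertToInteger bList) := by unfold Pre_convertToInteger; infer_instance
def pvWitness_convertToInteger : List Bool := [true, false, true]

def Spec_convertToInteger (bList : List Bool) (out : Int) : Prop := out = convertToInteger_alt bList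
instance (bList : List Bool) (out : Int) : Decidable (Spec_convertToInteger bList out) := by unfold Spec_convertToInteger; infer_instance

-- ===== CLAIM =====
def Claim_equal_convertToInteger : Prop := ∀ (bList : List Bool), Dom_convertToInteger bList → Pre_convertToInteger bList → Spec_convertToInteger bList (convertToInteger bList)

-- ===== LEMMAS AND PROOFS =====
theorem pvPowLoop_eq (k : Nat) (p : Int) : pvPowLoop k p = p * 2 ^ k := by
  induction k generalizing p with
  | zero => simp [pvPowLoop]
  | succ k ih => simp [pvPowLoop, ih]; ring

theorem pvLoopA_eq (bList : List Bool) (n k : Nat) (out : Int) (hn : n ≤ bList.length) :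
    pvLoopA bList n k out =
      out + 2 ^ k * (bList.take n).foldl (fun o b => o * 2 + (if b then 1 else 0)) 0 := by
  induction n generalizing k out with
  | zero => simp [pvLoopA]
  | succ n ih =>
      have hlt : n < bList.length := hn
      have htake : bList.take (n + 1) = bList.take n ++ [bList[n]] :=
        List.take_succ_eq_append_getElem hlt
      rw [pvLoopA, ih _ _ (Nat.le_of_lt hlt), htake]
      rw [List.foldl_append]
      simp only [List.foldl_cons, List.foldl_nil, List.getD_eq_getElem _ _ hlt]
      rcases h : bList[n] with _ | _ <;>
        simp [pvPowLoop_eq, pow_succ] <;> ring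

-- ===== VERDICT =====
theorem convertToInteger_spec : Claim_equal_convertToInteger := by
  intro bList _ hpre
  unfold Spec_convertToInteger convertToInteger convertToInteger_alt
  have h0 : bList.length ≠ 0 := by
    simpa [List.length_eq_zero_iff] using hpre
  rw [if_neg h0, if_neg h0, pvLoopA_eq bList bList.length 0 0 le_rfl]
  simp
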